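-- pv_equiv track=rewrite | github.com/fx2323/Graduate-Classes | CSC_401/4/assignment4_Andrew_Tillmann.py | exclamation
-- ===== SOURCE A (Python) =====
-- def exclamation(phrase):
--     'takes a sting and returns it with modification of vowels repeating themselves four times'
--
--     vowel_letters='AEIOUaeiou'
--     adjust=0 #will use to adjust i since program is adding to phrase length
--
--     for i in range(len(phrase)):
--         i=i+adjust #need the adjust to make sure vowels added are not looked over on the if statement below
--         if phrase[i] in vowel_letters:
--             phrase=phrase[:i+1]+phrase[i]*3+phrase[i+1:]
--             adjust +=3 #adjust the i for chaning the length by pharase[i]*3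
--
--     phrase=phrase+'!' #need to add ! to the end of string
--     #returns phrase
--     return phrase
-- ===== SOURCE B (Python) =====
-- def exclamation(phrase):
--     'takes a sting and returns it with modification of vowels repeating themselves four times'
--     return ''.join(c * 4 if c in 'AEIOUaeiou' else c for c in phrase) + '!'
-- ===== Notes on version B (the rewrite author's own statement) =====
-- stated objective: simpler
-- what changed: A's index loop with in-place string splicing and an offset counter is replaced by a single per-character expansion pass that joins each character quadrupled when it is a vowel, then appends the exclamation mark.
import Mathlib
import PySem

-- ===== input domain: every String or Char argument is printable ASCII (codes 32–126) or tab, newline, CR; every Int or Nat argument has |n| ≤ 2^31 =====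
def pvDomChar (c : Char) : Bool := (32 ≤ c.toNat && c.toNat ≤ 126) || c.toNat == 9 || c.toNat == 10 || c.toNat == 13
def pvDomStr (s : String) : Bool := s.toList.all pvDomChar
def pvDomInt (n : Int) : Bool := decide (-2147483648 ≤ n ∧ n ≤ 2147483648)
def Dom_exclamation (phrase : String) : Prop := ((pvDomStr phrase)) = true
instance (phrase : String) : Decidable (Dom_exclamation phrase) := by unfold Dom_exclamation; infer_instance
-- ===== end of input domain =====

-- B replaces A's positional scan with in-place splicing and an offset counter by a single
-- per-character expansion pass (join each character, quadrupled if it is a vowel), then the exclamation mark.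

-- ===== PORT A =====
def pvVowels : List Char := "AEIOUaeiou".toList

-- one iteration of A's 'for i in range(len(phrase))' loop, state = (phrase, adjust)
def pvStepA (st : List Char × Int) (i : Int) : List Char × Int :=
  let i := i + st.2                                   -- i = i + adjust
  match PySem.List.pyGet? st.1 i with                 -- phrase[i]; none = IndexError, unreachable (index stays in range)
  | none => st
  | some c =>
    if PySem.Chars.isIn [c] pvVowels then             -- phrase[i] in vowel_letters
      (PySem.List.slice st.1 none (some (i+1)) ++ [c, c, c] ++ PySem.List.slice st.1 (some (i+1)) none,
       st.2 + 3)                                      -- phrase[:i+1]+phrase[i]*3+phrase[i+1:], adjust += 3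
    else st

def exclamation (phrase : String) : String :=
  let res := (PySem.List.pyRange 0 (PySem.Chars.len phrase.toList) 1).foldl pvStepA (phrase.toList, 0)
  String.ofList (res.1 ++ ['!'])                           -- phrase + '!'

-- ===== PORT B =====
-- c*4 if c in 'AEIOUaeiou' else c
def pvQuad (c : Char) : List Char :=
  if PySem.Chars.isIn [c] pvVowels then [c, c, c, c] else [c]

def exclamation_alt (phrase : String) : String :=
  String.ofList (phrase.toList.flatMap pvQuad ++ ['!'])    -- ''.join(...) + '!'

-- ===== PRECONDITION & SPEC =====
def Spec_exclamation (phrase : String) (out : String) : Prop := out = exclamation_alt phrase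
instance (phrase : String) (out : String) : Decidable (Spec_exclamation phrase out) := by unfold Spec_exclamation; infer_instance

-- ===== CLAIM (what is proved, stated in full; the proofs are below) =====
def Claim_equal_exclamation : Prop := ∀ (phrase : String), Dom_exclamation phrase → Spec_exclamation phrase (exclamation phrase)

-- ===== LEMMAS AND PROOFS =====
def pvIsV (c : Char) : Bool := PySem.Chars.isIn [c] pvVowels

theorem pvQuad_length (p : List Char) :
    (p.flatMap pvQuad).length = p.length + 3 * p.countP pvIsV := by
  induction p with
  | nil => simp
  | cons c p ih =>
    simp only [List.flatMap_cons, List.length_append, List.countP_cons, ih, pvQuad, pvIsV]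
    split_ifs with h <;> simp <;> omega

-- loop invariant: after processing the first p.length characters of p ++ s,
-- the state is (expansion of p, followed by s; 3 * number of vowels in p)
theorem pvLoopA (s p : List Char) :
    (PySem.List.pyRange (p.length : Int) ((p.length : Int) + (s.length : Int)) 1).foldl
      pvStepA (p.flatMap pvQuad ++ s, 3 * (p.countP pvIsV : Int))
    = ((p ++ s).flatMap pvQuad, 3 * ((p ++ s).countP pvIsV : Int)) := by
  induction s generalizing p with
  | nil => simp [PySem.List.pyRange]
  | cons c s ih =>
    have hpeel := PySem.List.pyRange_one_cons
      (a := (p.length : Int)) (b := ((p.length : Int) + ((c :: s).length : Int)))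
      (by simp only [List.length_cons]; push_cast; omega)
    rw [hpeel]
    rw [List.foldl_cons]
    have hidx : (p.length : Int) + 3 * (p.countP pvIsV : Int)
        = ((p.flatMap pvQuad).length : Int) := by
      rw [pvQuad_length]; push_cast; ring
    have hstep : pvStepA (p.flatMap pvQuad ++ c :: s, 3 * (p.countP pvIsV : Int)) (p.length : Int)
        = ((p ++ [c]).flatMap pvQuad ++ s, 3 * ((p ++ [c]).countP pvIsV : Int)) := by
      simp only [pvStepA, hidx, PySem.List.pyGet?_append_length]
      by_cases hv : PySem.Chars.isIn [c] pvVowels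
      · simp only [hv, if_pos, Prod.mk.injEq]
        refine ⟨?_, ?_⟩
        · have h1 : ((p.flatMap pvQuad).length : Int) + 1 = (((p.flatMap pvQuad).length + 1 : Nat) : Int) := by push_cast; ring
          rw [h1, PySem.List.slice_to_natCast, PySem.List.slice_from_natCast]
          have ht : (p.flatMap pvQuad ++ c :: s).take ((p.flatMap pvQuad).length + 1)
              = p.flatMap pvQuad ++ [c] := by
            rw [List.take_append]; simp
          have hd : (p.flatMap pvQuad ++ c :: s).drop ((p.flatMap pvQuad).length + 1)
              = s := by
            rw [List.drop_append]; simp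
          rw [ht, hd]
          simp [pvQuad, hv]
        · simp [List.countP_append, pvIsV, hv]; ring
      · simp only [hv, if_neg, Bool.not_eq_true, Prod.mk.injEq]
        refine ⟨?_, ?_⟩
        · simp [pvQuad, hv]
        · simp [List.countP_append, pvIsV, hv]
    rw [hstep]
    have hlen : ((p.length : Int) + 1) = (((p ++ [c]).length : Nat) : Int) := by simp
    have hlen2 : (p.length : Int) + ((c :: s).length : Int) = (((p ++ [c]).length : Nat) : Int) + (s.length : Int) := by simp; ring
    rw [hlen, hlen2, ih (p ++ [c])]
    simp

theorem exclamation_spec : Claim_equal_exclamation := by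
  intro phrase _
  unfold Spec_exclamation exclamation exclamation_alt
  simp only [PySem.Chars.len_eq]
  have h := pvLoopA phrase.toList []
  simp only [List.length_nil, Nat.cast_zero, zero_add, List.flatMap_nil, List.nil_append,
    List.countP_nil, mul_zero] at h
  rw [h]

-- ===== VERDICT (by name: the statement is the Claim_ definition above) =====
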